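-- pv_equiv track=rewrite | github.com/Sarach-git/CS-SBU-eAdvancedAlgorithms-MSc-2023 | Assignments/401422078/hw2/4.py | backtract
-- ===== SOURCE A (Python) =====
-- def backtract(g, times, half, selected=[]):
--     if sum(selected) >= half:
--         if sum(selected) > g:
--             return False
--         else:
--             return True
--     for item in times:
--         remain_times = times.copy()
--         remain_times.remove(item)
--         if backtract(g, remain_times, half, selected+[item]):
--             return True
--     return False
-- ===== SOURCE B (Python) =====
-- def backtract(g, times, half, selected=[]):
--     s0 = sum(selected)
--     if s0 >= half:
--         return s0 <= g
--     reach = {s0}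
--     for t in times:
--         reach |= {t + r for r in reach}
--     return any(half <= v <= g for v in reach)
-- ===== Notes on version B (the rewrite author's own statement) =====
-- stated objective: alternative
-- what changed: Replaced the backtracking recursion over all orderings (copy+remove per branch) with a one-pass reachable-subset-sums set DP: fold over times accumulating the set of achievable sums, then check whether any lies in [half, g].
import Mathlib
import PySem

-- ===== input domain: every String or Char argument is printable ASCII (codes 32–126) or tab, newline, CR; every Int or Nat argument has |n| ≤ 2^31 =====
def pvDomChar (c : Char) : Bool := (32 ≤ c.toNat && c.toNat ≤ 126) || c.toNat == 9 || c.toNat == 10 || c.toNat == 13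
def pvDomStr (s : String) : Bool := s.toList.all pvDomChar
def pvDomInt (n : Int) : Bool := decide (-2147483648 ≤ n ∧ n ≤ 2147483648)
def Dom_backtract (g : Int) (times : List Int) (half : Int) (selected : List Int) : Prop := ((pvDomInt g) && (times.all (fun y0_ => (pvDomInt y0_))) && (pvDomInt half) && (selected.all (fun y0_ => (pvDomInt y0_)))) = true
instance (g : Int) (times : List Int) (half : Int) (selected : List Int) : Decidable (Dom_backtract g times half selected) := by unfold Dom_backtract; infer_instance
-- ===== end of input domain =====

-- B replaces A's backtracking recursion over all orderings with a one-pass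
-- reachable-subset-sums set DP (objective: alternative algorithm).


-- ===== PORT A =====
def backtract (g : Int) (times : List Int) (half : Int) (selected : List Int) : Bool :=
  if selected.sum ≥ half then
    if selected.sum > g then false else true
  else
    -- 'for item in times: … if backtract(g, remain_times, half, selected+[item]): return True' / 'return False'
    times.attach.any (fun item =>
      backtract g ((PySem.List.remove? times item.1).getD []) half (selected ++ [item.1]))
termination_by times.length
decreasing_by
  rw [PySem.List.remove?_eq_some_erase times item.1 item.2]
  have h1 : (times.erase item.1).length = times.length - 1 := List.length_erase_of_mem item.2
  have h2 : 0 < times.length := List.length_pos_of_mem item.2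
  simp only [Option.getD_some]
  omega

-- ===== PORT B =====
def backtract_alt (g : Int) (times : List Int) (half : Int) (selected : List Int) : Bool :=
  let s0 := selected.sum
  if s0 ≥ half then decide (s0 ≤ g)
  else
    let reach := times.foldl
      (fun (reach : PySem.Set Int) t =>
        PySem.Set.union reach (PySem.Set.ofList (List.map (fun r => t + r) reach)))
      (PySem.Set.ofList [s0])
    reach.any (fun v => decide (half ≤ v) && decide (v ≤ g))

-- ===== PRECONDITION & SPEC =====
def Spec_backtract (g : Int) (times : List Int) (half : Int) (selected : List Int) (out : Bool) : Prop := out = backtract_alt g times half selected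
instance (g : Int) (times : List Int) (half : Int) (selected : List Int) (out : Bool) : Decidable (Spec_backtract g times half selected out) := by unfold Spec_backtract; infer_instance

-- ===== CLAIM (what is proved, stated in full; the proofs are below) =====
def Claim_equal_backtract : Prop := ∀ (g : Int) (times : List Int) (half : Int) (selected : List Int), Dom_backtract g times half selected → Spec_backtract g times half selected (backtract g times half selected)

-- ===== LEMMAS AND PROOFS =====

/-- The common specification: some sub-multiset of `times` brings the running sum `s0`
into the window `[half, g]`. -/
def SpecR (g half s0 : Int) (times : List Int) : Prop :=
  ∃ S : Multiset Int, S ≤ (times : Multiset Int) ∧ half ≤ s0 + S.sum ∧ s0 + S.sum ≤ g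

theorem multiset_le_cons_iff {a : Int} {S t : Multiset Int} :
    S ≤ a ::ₘ t ↔ S ≤ t ∨ ∃ S', S' ≤ t ∧ S = a ::ₘ S' := by
  constructor
  · intro h
    by_cases hm : a ∈ S
    · right
      refine ⟨S.erase a, ?_, (Multiset.cons_erase hm).symm⟩
      simpa [Multiset.erase_cons_head] using Multiset.erase_le_erase a h
    · left
      rw [Multiset.le_iff_count] at h ⊢
      intro b
      have hb := h b
      by_cases hba : b = a
      · subst hba; simp [Multiset.count_eq_zero.mpr hm]
      · simpa [Multiset.count_cons_of_ne hba] using hb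
  · rintro (h | ⟨S', hS', rfl⟩)
    · exact le_trans h (Multiset.le_cons_self _ _)
    · exact Multiset.cons_le_cons a hS'

/-- Characterization of A's backtracking recursion. -/
theorem backtract_iff (g half : Int) :
    ∀ (n : Nat) (times selected : List Int), times.length ≤ n →
      (backtract g times half selected = true ↔
        (if half ≤ selected.sum then selected.sum ≤ g else SpecR g half selected.sum times)) := by
  intro n
  induction n with
  | zero =>
    intro times selected hlen
    have htimes : times = [] := List.eq_nil_of_length_eq_zero (Nat.le_zero.mp hlen)
    subst htimes
    rw [backtract]
    by_cases hs : half ≤ selected.sum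
    · simp only [ge_iff_le, hs, if_pos]
      by_cases hg : selected.sum > g
      · simp [hg]
      · simp [hg]
        omega
    · simp only [ge_iff_le, hs, if_false]
      simp only [List.attach_nil, List.any_nil]
      constructor
      · intro h; exact absurd h (by simp)
      · rintro ⟨S, hle, h1, h2⟩
        exfalso
        have : S = 0 := Multiset.le_zero.mp (by simpa using hle)
        subst this
        simp at h1
        omega
  | succ n ih =>
    intro times selected hlen
    rw [backtract]
    by_cases hs : half ≤ selected.sum
    · simp only [ge_iff_le, hs, if_pos]
      by_cases hg : selected.sum > g
      · simp [hg]
      · simp [hg]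
        omega
    · simp only [ge_iff_le, hs, if_false]
      rw [List.any_eq_true]
      constructor
      · rintro ⟨item, -, hrec⟩
        rw [PySem.List.remove?_eq_some_erase times item.1 item.2, Option.getD_some] at hrec
        have hlen' : (times.erase item.1).length ≤ n := by
          have := List.length_erase_of_mem item.2
          have := List.length_pos_of_mem item.2
          omega
        rw [ih (times.erase item.1) (selected ++ [item.1]) hlen'] at hrec
        have hsum : (selected ++ [item.1]).sum = selected.sum + item.1 := by simp
        rw [hsum] at hrec
        by_cases h1 : half ≤ selected.sum + item.1
        · rw [if_pos h1] at hrec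
          refine ⟨{item.1}, ?_, ?_, ?_⟩
          · exact Multiset.singleton_le.mpr (by simpa using item.2)
          · simpa using h1
          · simpa using hrec
        · rw [if_neg h1] at hrec
          obtain ⟨S', hle, hb1, hb2⟩ := hrec
          refine ⟨item.1 ::ₘ S', ?_, ?_, ?_⟩
          · have hmem : item.1 ∈ (times : Multiset Int) := by simpa using item.2
            calc item.1 ::ₘ S' ≤ item.1 ::ₘ ((times : Multiset Int).erase item.1) := by
                  refine Multiset.cons_le_cons _ ?_
                  simpa [Multiset.coe_erase] using hle
              _ = (times : Multiset Int) := Multiset.cons_erase hmem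
          · rw [Multiset.sum_cons]; omega
          · rw [Multiset.sum_cons]; omega
      · rintro ⟨S, hle, h1, h2⟩
        have hS0 : S ≠ 0 := by
          rintro rfl; simp at h1; omega
        by_cases hx : ∃ x ∈ S, selected.sum + x < half
        · obtain ⟨x, hxS, hxlt⟩ := hx
          have hxt : x ∈ times := by
            have := Multiset.mem_of_le hle hxS
            simpa using this
          refine ⟨⟨x, hxt⟩, List.mem_attach _ _, ?_⟩
          rw [PySem.List.remove?_eq_some_erase times x hxt, Option.getD_some]
          have hlen' : (times.erase x).length ≤ n := by
            have := List.length_erase_of_mem hxt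
            have := List.length_pos_of_mem hxt
            omega
          rw [ih (times.erase x) (selected ++ [x]) hlen']
          have hsum : (selected ++ [x]).sum = selected.sum + x := by simp
          rw [hsum, if_neg (by omega)]
          refine ⟨S.erase x, ?_, ?_, ?_⟩
          · have := Multiset.erase_le_erase x hle
            simpa [Multiset.coe_erase] using this
          · have := Multiset.cons_erase hxS
            have hsplit : S.sum = x + (S.erase x).sum := by
              conv_lhs => rw [← this]
              simp [Multiset.sum_cons]
            omega
          · have := Multiset.cons_erase hxS
            have hsplit : S.sum = x + (S.erase x).sum := by
              conv_lhs => rw [← this]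
              simp [Multiset.sum_cons]
            omega
        · push Not at hx
          obtain ⟨x, hxS⟩ := Multiset.exists_mem_of_ne_zero hS0
          have hxt : x ∈ times := by
            have := Multiset.mem_of_le hle hxS
            simpa using this
          have hpos : ∀ y ∈ S.erase x, (0:Int) ≤ y := by
            intro y hy
            have hyS : y ∈ S := Multiset.mem_of_mem_erase hy
            have := hx y hyS
            omega
          have hsplit : S.sum = x + (S.erase x).sum := by
            conv_lhs => rw [← Multiset.cons_erase hxS]
            simp [Multiset.sum_cons]
          have herasepos : (0:Int) ≤ (S.erase x).sum := Multiset.sum_nonneg hpos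
          refine ⟨⟨x, hxt⟩, List.mem_attach _ _, ?_⟩
          rw [PySem.List.remove?_eq_some_erase times x hxt, Option.getD_some]
          have hlen' : (times.erase x).length ≤ n := by
            have := List.length_erase_of_mem hxt
            have := List.length_pos_of_mem hxt
            omega
          rw [ih (times.erase x) (selected ++ [x]) hlen']
          have hsum : (selected ++ [x]).sum = selected.sum + x := by simp
          have hge : half ≤ selected.sum + x := hx x hxS
          rw [hsum, if_pos hge]
          omega

/-- Membership in B's reachable-sums set after folding over `l`. -/
theorem mem_reach (l : List Int) :
    ∀ (s : List Int) (y : Int),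
      (y ∈ l.foldl
        (fun (reach : PySem.Set Int) t =>
          PySem.Set.union reach (PySem.Set.ofList (List.map (fun r => t + r) reach)))
        s)
      ↔ ∃ r ∈ s, ∃ S : Multiset Int, S ≤ (l : Multiset Int) ∧ y = r + S.sum := by
  induction l with
  | nil =>
    intro s y
    simp only [List.foldl_nil, Multiset.coe_nil]
    constructor
    · intro h
      exact ⟨y, h, 0, Multiset.le_zero.mpr rfl, by simp⟩
    · rintro ⟨r, hr, S, hS, rfl⟩
      have : S = 0 := Multiset.le_zero.mp hS
      subst this
      simpa using hr
  | cons t l ihl =>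
    intro s y
    simp only [List.foldl_cons]
    rw [ihl]
    have hcoe : ((t :: l : List Int) : Multiset Int) = t ::ₘ (l : Multiset Int) := rfl
    constructor
    · rintro ⟨r, hr, S, hS, rfl⟩
      rw [PySem.Set.mem_union] at hr
      rcases hr with hr | hr
      · exact ⟨r, hr, S, by rw [hcoe]; exact le_trans hS (Multiset.le_cons_self _ _), rfl⟩
      · rw [PySem.Set.mem_ofList, List.mem_map] at hr
        obtain ⟨r', hr', rfl⟩ := hr
        refine ⟨r', hr', t ::ₘ S, ?_, ?_⟩
        · rw [hcoe]; exact Multiset.cons_le_cons t hS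
        · rw [Multiset.sum_cons]; ring
    · rintro ⟨r, hr, S, hS, rfl⟩
      rw [hcoe, multiset_le_cons_iff] at hS
      rcases hS with hS | ⟨S', hS', rfl⟩
      · exact ⟨r, (PySem.Set.mem_union _ _ _).mpr (Or.inl hr), S, hS, rfl⟩
      · refine ⟨t + r, (PySem.Set.mem_union _ _ _).mpr (Or.inr ?_), S', hS', ?_⟩
        · rw [PySem.Set.mem_ofList, List.mem_map]; exact ⟨r, hr, rfl⟩
        · rw [Multiset.sum_cons]; ring

/-- Characterization of B. -/
theorem backtract_alt_iff (g half : Int) (times selected : List Int) :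
    backtract_alt g times half selected = true ↔
      (if half ≤ selected.sum then selected.sum ≤ g else SpecR g half selected.sum times) := by
  unfold backtract_alt
  by_cases hs : half ≤ selected.sum
  · simp [hs]
  · simp only [ge_iff_le, hs, if_false]
    rw [List.any_eq_true]
    constructor
    · rintro ⟨v, hv, hcond⟩
      rw [mem_reach] at hv
      obtain ⟨r, hr, S, hS, rfl⟩ := hv
      have hr' : r = selected.sum := by
        rw [PySem.Set.mem_ofList] at hr
        simpa using hr
      subst hr'
      simp only [Bool.and_eq_true, decide_eq_true_eq] at hcond
      exact ⟨S, hS, hcond.1, hcond.2⟩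
    · rintro ⟨S, hS, h1, h2⟩
      refine ⟨selected.sum + S.sum, ?_, ?_⟩
      · rw [mem_reach]
        refine ⟨selected.sum, ?_, S, hS, rfl⟩
        rw [PySem.Set.mem_ofList]; simp
      · simp only [Bool.and_eq_true, decide_eq_true_eq]
        exact ⟨h1, h2⟩

-- ===== VERDICT (by name: the statement is the Claim_ definition above) =====
theorem backtract_spec : Claim_equal_backtract := by
  intro g times half selected _
  unfold Spec_backtract
  rw [Bool.eq_iff_iff, backtract_iff g half times.length times selected (le_refl _),
    backtract_alt_iff g half times selected]
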